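-- pv_equiv track=rewrite | github.com/peterthorpe5/PT_nanopore_spike_in_pathogen_detection | scripts/summarise_metabuli_report.py | find_target_row
-- ===== SOURCE A (Python) =====
-- from typing import Optional
--
-- def find_target_row(
--     rows: list[dict[str, str]],
--     target_label: str,
--     target_taxid: Optional[str],
-- ) -> Optional[dict[str, str]]:
--     """
--     Find a target row in the Kraken-format report.
--
--     Parameters
--     ----------
--     rows : list[dict[str, str]]
--         Parsed report rows.
--     target_label : str
--         Target label.
--     target_taxid : Optional[str]
--         Optional target taxon ID.
--
--     Returns
--     -------
--     Optional[dict[str, str]]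
--         Matching row, or None if not found.
--     """
--     if target_taxid is not None:
--         for row in rows:
--             if row["taxid"] == target_taxid:
--                 return row
--
--     label_norm = target_label.strip().casefold()
--     for row in rows:
--         if row["name"].strip().casefold() == label_norm:
--             return row
--
--     return None
-- ===== SOURCE B (Python) =====
-- from typing import Optional
--
--
-- def find_target_row(
--     rows: list[dict[str, str]],
--     target_label: str,
--     target_taxid: Optional[str],
-- ) -> Optional[dict[str, str]]:
--     """Single pass: return a taxid match immediately; remember the first name match."""
--     label_norm = target_label.strip().casefold()
--     name_match = None
--     for row in rows:
--         if target_taxid is not None and row["taxid"] == target_taxid: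
--             return row
--         nm = row.get("name")
--         if name_match is None and nm is not None and nm.strip().casefold() == label_norm:
--             name_match = row
--     return name_match
-- ===== Notes on version B (the rewrite author's own statement) =====
-- stated objective: alternative
-- what changed: A's two sequential scans (taxid scan, then name scan) are collapsed into one pass that returns a taxid match immediately and remembers the first name match in a local variable.
import Mathlib
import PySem

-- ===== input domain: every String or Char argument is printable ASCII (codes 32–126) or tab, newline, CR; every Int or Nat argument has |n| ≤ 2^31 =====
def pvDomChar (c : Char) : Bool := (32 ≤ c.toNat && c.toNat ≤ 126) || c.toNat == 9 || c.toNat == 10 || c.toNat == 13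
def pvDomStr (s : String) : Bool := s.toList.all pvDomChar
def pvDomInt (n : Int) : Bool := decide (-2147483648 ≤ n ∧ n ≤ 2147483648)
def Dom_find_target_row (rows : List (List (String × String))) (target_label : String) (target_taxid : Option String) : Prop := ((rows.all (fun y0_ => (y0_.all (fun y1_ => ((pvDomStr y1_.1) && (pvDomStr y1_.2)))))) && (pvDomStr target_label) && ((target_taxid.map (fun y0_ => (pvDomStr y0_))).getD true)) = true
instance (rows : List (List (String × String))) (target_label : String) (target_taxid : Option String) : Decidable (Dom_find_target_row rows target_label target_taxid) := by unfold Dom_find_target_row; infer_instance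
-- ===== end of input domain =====

-- B collapses A's two sequential scans into one pass that returns a taxid match
-- immediately and remembers the first name match (objective: alternative decomposition).

-- shared helpers: row["k"] first-match lookup, and s.strip().casefold()
-- (casefold = lower, exact on the ASCII domain Dom_ admits)
def pvRowGet (row : List (String × String)) (k : String) : Option String :=
  (PySem.Dict.mk row).get? k

def pvNorm (s : String) : String :=
  PySem.Str.lower (PySem.Str.strip s)

-- ===== PORT A =====
-- first loop: `for row in rows: if row["taxid"] == target_taxid: return row`
def pvTaxidScan (t : String) : List (List (String × String)) → Option (List (String × String))
  | [] => none
  | r :: rest => if pvRowGet r "taxid" == some t then some r else pvTaxidScan t rest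

-- second loop: `for row in rows: if row["name"].strip().casefold() == label_norm: return row`
def pvNameScan (norm : String) : List (List (String × String)) → Option (List (String × String))
  | [] => none
  | r :: rest =>
      if (pvRowGet r "name").map pvNorm == some norm then some r else pvNameScan norm rest

def find_target_row (rows : List (List (String × String))) (target_label : String) (target_taxid : Option String) : Option (List (String × String)) :=
  match target_taxid with
  | some t =>
      match pvTaxidScan t rows with
      | some r => some r
      | none => pvNameScan (pvNorm target_label) rows
  | none => pvNameScan (pvNorm target_label) rows

-- ===== PORT B =====
-- the single `for row in rows` loop of Source B; `cand` is the remembered first name match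
def pvAltLoop (tt : Option String) (norm : String) :
    List (List (String × String)) → Option (List (String × String)) → Option (List (String × String))
  | [], cand => cand
  | r :: rest, cand =>
      if tt.isSome && (pvRowGet r "taxid" == tt) then some r
      else
        pvAltLoop tt norm rest
          (if cand.isNone && ((pvRowGet r "name").map pvNorm == some norm) then some r else cand)

def find_target_row_alt (rows : List (List (String × String))) (target_label : String) (target_taxid : Option String) : Option (List (String × String)) :=
  pvAltLoop target_taxid (pvNorm target_label) rows none

-- ===== PRECONDITION & SPEC =====
-- Pre_ is exactly the inputs on which Python A returns normally: every row the scans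
-- actually touch carries the key they read ("taxid" in the taxid scan, "name" in the
-- name scan, each scan stopping at its first match); elsewhere A raises KeyError.
def pvHasKey (r : List (String × String)) (k : String) : Bool := (PySem.Dict.mk r).contains k

def Pre_find_target_row (rows : List (List (String × String))) (target_label : String) (target_taxid : Option String) : Prop :=
  match target_taxid with
  | some t =>
      ((rows.takeWhile (fun r => !(pvRowGet r "taxid" == some t))).all
         (fun r => pvHasKey r "taxid")) = true ∧
      (rows.all (fun r => !(pvRowGet r "taxid" == some t)) = true →
        ((rows.takeWhile (fun r => !((pvRowGet r "name").map pvNorm == some (pvNorm target_label)))).all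
           (fun r => pvHasKey r "name")) = true)
  | none =>
      ((rows.takeWhile (fun r => !((pvRowGet r "name").map pvNorm == some (pvNorm target_label)))).all
         (fun r => pvHasKey r "name")) = true
instance (rows : List (List (String × String))) (target_label : String) (target_taxid : Option String) : Decidable (Pre_find_target_row rows target_label target_taxid) := by unfold Pre_find_target_row; cases target_taxid <;> infer_instance

def pvWitness_find_target_row : (List (List (String × String))) × String × Option String :=
  ([[("taxid", "1"), ("name", "E coli")]], " e COLI ", some "2")

def Spec_find_target_row (rows : List (List (String × String))) (target_label : String) (target_taxid : Option String) (out : Option (List (String × String))) : Prop := out = find_target_row_alt rows target_label target_taxid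
instance (rows : List (List (String × String))) (target_label : String) (target_taxid : Option String) (out : Option (List (String × String))) : Decidable (Spec_find_target_row rows target_label target_taxid out) := by unfold Spec_find_target_row; infer_instance

-- ===== CLAIM (what is proved, stated in full; the proofs are below) =====
def Claim_equal_find_target_row : Prop := ∀ (rows : List (List (String × String))) (target_label : String) (target_taxid : Option String), Dom_find_target_row rows target_label target_taxid → Pre_find_target_row rows target_label target_taxid → Spec_find_target_row rows target_label target_taxid (find_target_row rows target_label target_taxid)

-- ===== LEMMAS AND PROOFS =====

-- B's single loop equals: taxid scan first; if it misses, the remembered candidate,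
-- else A's name scan.
theorem pvAltLoop_eq (tt : Option String) (norm : String) :
    ∀ (rows : List (List (String × String))) (cand : Option (List (String × String))),
      pvAltLoop tt norm rows cand =
        ((match tt with | some t => pvTaxidScan t rows | none => none).or
          (cand.or (pvNameScan norm rows))) := by
  intro rows
  induction rows with
  | nil =>
      intro cand
      cases tt <;> simp [pvAltLoop, pvTaxidScan, pvNameScan]
  | cons r rest ih =>
      intro cand
      cases tt with
      | none =>
          simp only [pvAltLoop, Option.isSome_none, Bool.false_and, ih]
          cases cand with
          | some c => simp [pvNameScan]
          | none =>
              by_cases h : ((pvRowGet r "name").map pvNorm == some norm) = true <;>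
                simp [pvNameScan, h]
      | some t =>
          by_cases ht : (pvRowGet r "taxid" == some t) = true
          · simp [pvAltLoop, pvTaxidScan, ht]
          · simp only [pvAltLoop, Option.isSome_some, Bool.true_and, ht, ih,
              pvTaxidScan]
            cases cand with
            | some c => simp [pvNameScan]
            | none =>
                by_cases h : ((pvRowGet r "name").map pvNorm == some norm) = true <;>
                  simp [pvNameScan, h]

-- ===== VERDICT (by name: the statement is the Claim_ definition above) =====
theorem find_target_row_spec : Claim_equal_find_target_row := by
  intro rows target_label target_taxid _ _
  unfold Spec_find_target_row find_target_row find_target_row_alt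
  rw [pvAltLoop_eq]
  cases target_taxid with
  | none => simp
  | some t => cases h : pvTaxidScan t rows <;> simp [h]
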